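-- pv_equiv track=rewrite | github.com/VanshGangwal/plivo-application | src/generate_data.py | noisy_stt
-- ===== SOURCE A (Python) =====
-- def spell_out_numbers(text):
--     mapping = {
--         '0': 'zero', '1': 'one', '2': 'two', '3': 'three', '4': 'four',
--         '5': 'five', '6': 'six', '7': 'seven', '8': 'eight', '9': 'nine'
--     }
--     return ''.join([mapping.get(c, c) if c.isdigit() else c for c in text])
--
-- def noisy_stt(text):
--     text = text.lower()
--     text = text.replace(".", " dot ")
--     text = text.replace("@", " at ")
--     text = text.replace("-", " ")
--     text = spell_out_numbers(text)
--     # Remove other punctuation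
--     text = "".join([c for c in text if c.isalnum() or c.isspace()])
--     return " ".join(text.split())
-- ===== SOURCE B (Python) =====
-- def noisy_stt(text):
--     m = {
--         '.': ' dot ', '@': ' at ', '-': ' ',
--         '0': 'zero', '1': 'one', '2': 'two', '3': 'three', '4': 'four',
--         '5': 'five', '6': 'six', '7': 'seven', '8': 'eight', '9': 'nine',
--     }
--     out = []
--     for ch in text.lower():
--         if ch in m:
--             out.append(m[ch])
--         elif ch.isalnum() or ch.isspace():
--             out.append(ch)
--     return ' '.join(''.join(out).split())
-- ===== Notes on version B (the rewrite author's own statement) =====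
-- stated objective: simpler
-- what changed: Replaced A's six sequential full-string passes (three .replace calls, a digit-spelling join, a punctuation filter) by one combined mapping dict and a single scan over the lowered characters, followed by the same split/join whitespace collapse.
import Mathlib
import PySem

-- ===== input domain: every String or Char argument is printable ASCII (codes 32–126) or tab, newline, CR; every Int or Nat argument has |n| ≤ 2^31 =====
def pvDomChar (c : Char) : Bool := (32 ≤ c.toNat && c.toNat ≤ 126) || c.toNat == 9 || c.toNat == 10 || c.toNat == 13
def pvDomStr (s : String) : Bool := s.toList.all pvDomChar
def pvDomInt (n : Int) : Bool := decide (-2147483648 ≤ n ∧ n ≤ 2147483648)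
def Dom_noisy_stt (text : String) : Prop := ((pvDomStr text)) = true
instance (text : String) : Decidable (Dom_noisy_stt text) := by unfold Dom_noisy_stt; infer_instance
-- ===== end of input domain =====

-- B replaces A's six sequential full-string passes with one mapping dict and a single
-- scan over the lowered characters (objective: simpler decomposition, same cost class).

-- ===== PORT A =====
-- the digit dict of spell_out_numbers
def pvDigitMap : PySem.Dict Char (List Char) :=
  PySem.Dict.mk [('0', ['z','e','r','o']), ('1', ['o','n','e']), ('2', ['t','w','o']),
    ('3', ['t','h','r','e','e']), ('4', ['f','o','u','r']), ('5', ['f','i','v','e']),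
    ('6', ['s','i','x']), ('7', ['s','e','v','e','n']), ('8', ['e','i','g','h','t']),
    ('9', ['n','i','n','e'])]

-- ''.join([mapping.get(c, c) if c.isdigit() else c for c in text])
def spell_out_numbers (cs : List Char) : List Char :=
  PySem.Chars.join []
    (cs.map (fun c => if PySem.Chars.isdigit c then pvDigitMap.getD c [c] else [c]))

def noisy_stt (text : String) : String :=
  let t1 := PySem.Chars.lower text.toList
  let t2 := PySem.Chars.replace t1 ['.'] [' ','d','o','t',' ']
  let t3 := PySem.Chars.replace t2 ['@'] [' ','a','t',' ']
  let t4 := PySem.Chars.replace t3 ['-'] [' ']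
  let t5 := spell_out_numbers t4
  let t6 := t5.filter (fun c => PySem.Chars.isalnum c || PySem.Chars.isspace c)
  String.ofList (PySem.Chars.join [' '] (PySem.Chars.split₀ t6))

-- ===== PORT B =====
-- the single mapping dict of Source B
def pvMap : PySem.Dict Char (List Char) :=
  PySem.Dict.mk [('.', [' ','d','o','t',' ']), ('@', [' ','a','t',' ']), ('-', [' ']),
    ('0', ['z','e','r','o']), ('1', ['o','n','e']), ('2', ['t','w','o']),
    ('3', ['t','h','r','e','e']), ('4', ['f','o','u','r']), ('5', ['f','i','v','e']),
    ('6', ['s','i','x']), ('7', ['s','e','v','e','n']), ('8', ['e','i','g','h','t']),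
    ('9', ['n','i','n','e'])]

def noisy_stt_alt (text : String) : String :=
  let out := (PySem.Chars.lower text.toList).foldl
    (fun acc ch =>
      if pvMap.contains ch then acc ++ pvMap.getD ch []
      else if PySem.Chars.isalnum ch || PySem.Chars.isspace ch then acc ++ [ch]
      else acc) []
  String.ofList (PySem.Chars.join [' '] (PySem.Chars.split₀ out))

-- ===== PRECONDITION & SPEC =====
def Spec_noisy_stt (text : String) (out : String) : Prop := out = noisy_stt_alt text
instance (text : String) (out : String) : Decidable (Spec_noisy_stt text out) := by unfold Spec_noisy_stt; infer_instance

-- ===== CLAIM (what is proved, stated in full; the proofs are below) =====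
def Claim_equal_noisy_stt : Prop := ∀ (text : String), Dom_noisy_stt text → Spec_noisy_stt text (noisy_stt text)

-- ===== LEMMAS AND PROOFS =====

-- single-char-needle replace is a per-character flatMap
theorem replace_go_single (c : Char) (new : List Char) (l acc : List Char) (fuel : Nat)
    (h : l.length ≤ fuel) :
    PySem.Chars.replace.go [c] new fuel l acc
      = acc.reverse ++ l.flatMap (fun x => if x = c then new else [x]) := by
  induction l generalizing fuel acc with
  | nil => cases fuel <;> simp [PySem.Chars.replace.go]
  | cons x t ih =>
    cases fuel with
    | zero => simp at h
    | succ fuel =>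
      by_cases hx : x = c
      · subst hx
        have hstep : PySem.Chars.replace.go [x] new (fuel+1) (x::t) acc
            = PySem.Chars.replace.go [x] new fuel t (new.reverse ++ acc) := by
          simp [PySem.Chars.replace.go, List.isPrefixOf]
        rw [hstep, ih (new.reverse ++ acc) fuel (by simp at h; omega)]
        simp
      · have hp : ([c].isPrefixOf (x :: t)) = false := by
          simp [List.isPrefixOf]
          exact fun hcx => (hx hcx.symm).elim
        have hstep : PySem.Chars.replace.go [c] new (fuel+1) (x::t) acc
            = PySem.Chars.replace.go [c] new fuel t (x :: acc) := by
          simp [PySem.Chars.replace.go, hp]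
        rw [hstep, ih (x :: acc) fuel (by simp at h; omega)]
        simp [hx]

theorem replace_single (l : List Char) (c : Char) (new : List Char) :
    PySem.Chars.replace l [c] new = l.flatMap (fun x => if x = c then new else [x]) := by
  rw [PySem.Chars.replace]
  simp only [List.isEmpty_cons, Bool.false_eq_true, if_false]
  simpa using replace_go_single c new l [] l.length (Nat.le_refl _)

theorem join_nil_flatten (parts : List (List Char)) :
    PySem.Chars.join [] parts = parts.flatten := by
  induction parts with
  | nil => rfl
  | cons p ps ih =>
    cases ps with
    | nil => simp [PySem.Chars.join, List.intercalate]
    | cons q qs =>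
      simp only [PySem.Chars.join, List.intercalate] at *
      simp [List.intersperse, List.flatten] at *
      simpa using ih

-- the per-character actions of A's pipeline
def pvF1 (c : Char) : List Char := if c = '.' then [' ','d','o','t',' '] else [c]
def pvF2 (c : Char) : List Char := if c = '@' then [' ','a','t',' '] else [c]
def pvF3 (c : Char) : List Char := if c = '-' then [' '] else [c]
def pvF4 (c : Char) : List Char :=
  if PySem.Chars.isdigit c then pvDigitMap.getD c [c] else [c]
def pvP (c : Char) : Bool := PySem.Chars.isalnum c || PySem.Chars.isspace c
-- A's whole pipeline, per character
def pvFA (c : Char) : List Char :=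
  ((((pvF1 c).flatMap pvF2).flatMap pvF3).flatMap pvF4).filter pvP
-- B's per-character action
def pvG (c : Char) : List Char :=
  if pvMap.contains c then pvMap.getD c []
  else if PySem.Chars.isalnum c || PySem.Chars.isspace c then [c] else []

theorem char_eq_of_toNat {c d : Char} (h : c.toNat = d.toNat) : c = d := by
  have h1 := Char.ofNat_toNat c
  have h2 := Char.ofNat_toNat d
  rw [h] at h1; rw [← h1, h2]

theorem pointwise (c : Char) : pvFA c = pvG c := by
  by_cases h1 : c = '.'
  · subst h1; decide
  by_cases h2 : c = '@'
  · subst h2; decide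
  by_cases h3 : c = '-'
  · subst h3; decide
  by_cases hd : PySem.Chars.isdigit c = true
  · have hb : 48 ≤ c.toNat ∧ c.toNat ≤ 57 := by
      simp only [PySem.Chars.isdigit, Bool.and_eq_true, decide_eq_true_eq, Char.le_def] at hd
      exact ⟨UInt32.le_iff_toNat_le.mp hd.1, UInt32.le_iff_toNat_le.mp hd.2⟩
    have h10 : c.toNat = 48 ∨ c.toNat = 49 ∨ c.toNat = 50 ∨ c.toNat = 51 ∨ c.toNat = 52 ∨
        c.toNat = 53 ∨ c.toNat = 54 ∨ c.toNat = 55 ∨ c.toNat = 56 ∨ c.toNat = 57 := by omega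
    rcases h10 with h|h|h|h|h|h|h|h|h|h
    · have := char_eq_of_toNat (d := '0') (by simpa using h); subst this; decide
    · have := char_eq_of_toNat (d := '1') (by simpa using h); subst this; decide
    · have := char_eq_of_toNat (d := '2') (by simpa using h); subst this; decide
    · have := char_eq_of_toNat (d := '3') (by simpa using h); subst this; decide
    · have := char_eq_of_toNat (d := '4') (by simpa using h); subst this; decide
    · have := char_eq_of_toNat (d := '5') (by simpa using h); subst this; decide
    · have := char_eq_of_toNat (d := '6') (by simpa using h); subst this; decide
    · have := char_eq_of_toNat (d := '7') (by simpa using h); subst this; decide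
    · have := char_eq_of_toNat (d := '8') (by simpa using h); subst this; decide
    · have := char_eq_of_toNat (d := '9') (by simpa using h); subst this; decide
  · -- ordinary character: not one of '.', '@', '-', not an ASCII digit
    have hm : pvMap.contains c = false := by
      simp [pvMap, PySem.Dict.contains]
      exact ⟨fun h => h1 h.symm, fun h => h2 h.symm, fun h => h3 h.symm,
        fun h => hd (by rw [← h]; decide), fun h => hd (by rw [← h]; decide),
        fun h => hd (by rw [← h]; decide), fun h => hd (by rw [← h]; decide),
        fun h => hd (by rw [← h]; decide), fun h => hd (by rw [← h]; decide),
        fun h => hd (by rw [← h]; decide), fun h => hd (by rw [← h]; decide),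
        fun h => hd (by rw [← h]; decide), fun h => hd (by rw [← h]; decide)⟩
    by_cases hq : (PySem.Chars.isalnum c || PySem.Chars.isspace c) = true
    · simp [pvFA, pvF1, pvF2, pvF3, pvF4, pvG, pvP, h1, h2, h3, hd, hm, hq, List.filter_singleton]
    · simp [pvFA, pvF1, pvF2, pvF3, pvF4, pvG, pvP, h1, h2, h3, hd, hm, hq, List.filter_singleton]

-- A's pipeline, as one flatMap over the lowered characters
theorem a_as_flatMap (cs : List Char) :
    (spell_out_numbers
        (PySem.Chars.replace
          (PySem.Chars.replace (PySem.Chars.replace cs ['.'] [' ','d','o','t',' '])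
            ['@'] [' ','a','t',' '])
          ['-'] [' '])).filter (fun c => PySem.Chars.isalnum c || PySem.Chars.isspace c)
      = cs.flatMap pvG := by
  rw [replace_single, replace_single, replace_single]
  rw [spell_out_numbers, join_nil_flatten, ← List.flatMap_def]
  rw [List.flatMap_assoc, List.flatMap_assoc, List.flatMap_assoc, List.filter_flatMap]
  refine List.flatMap_congr fun c _ => ?_
  have h := pointwise c
  simp only [pvFA, pvF1, pvF2, pvF3, pvF4, pvP, List.flatMap_assoc, List.filter_flatMap] at h ⊢
  exact h

-- B's fold, as the same flatMap
theorem b_as_flatMap (cs : List Char) :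
    cs.foldl
      (fun acc ch =>
        if pvMap.contains ch then acc ++ pvMap.getD ch []
        else if PySem.Chars.isalnum ch || PySem.Chars.isspace ch then acc ++ [ch]
        else acc) []
      = cs.flatMap pvG := by
  have hbody : (fun (acc : List Char) (ch : Char) =>
      if pvMap.contains ch then acc ++ pvMap.getD ch []
      else if PySem.Chars.isalnum ch || PySem.Chars.isspace ch then acc ++ [ch]
      else acc) = (fun acc ch => acc ++ pvG ch) := by
    funext acc ch
    simp only [pvG]
    split_ifs <;> simp
  rw [hbody, PySem.List.foldl_append_eq_flatMap]
  simp

-- ===== VERDICT (by name: the statement is the Claim_ definition above) =====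
theorem noisy_stt_spec : Claim_equal_noisy_stt := by
  intro text _
  show noisy_stt text = noisy_stt_alt text
  simp only [noisy_stt, noisy_stt_alt]
  rw [a_as_flatMap, b_as_flatMap]
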